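-- pv_equiv track=rewrite | github.com/Kevin-MN/dsc40b | min_ell_theta.py | minimize_ell
-- ===== SOURCE A (Python) =====
-- def compute_ell(data, colors, theta):
--     loss = 0
--
--     for n in range(len(data)):
--         if (colors[n] == 'blue'):
--             if (data[n] > theta):
--                 loss+=1
--         elif (colors[n] == 'red'):
--             if (data[n] <= theta):
--                 loss+=1
--
--     return loss
--
-- def minimize_ell(data,colors):
--
--     min_ell = float('inf')
--     min_index = 0
--     for n in range(len(data)):
--         temp_ell = compute_ell(data, colors,data[n])
--         if temp_ell < min_ell:
--             min_ell = temp_ell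
--             min_index = n
--
--     return data[min_index]
-- ===== SOURCE B (Python) =====
-- def minimize_ell(data, colors):
--     # Sort the (value, color) pairs by value, sweep once to obtain the loss
--     # for every threshold value, then scan data in original order for the
--     # first strict minimum.  O(n log n) instead of A's O(n^2).
--     n = len(data)
--     pairs = sorted(zip(data, colors[:n]), key=lambda p: p[0])
--     total_blue = 0
--     for _, c in pairs:
--         if c == 'blue':
--             total_blue += 1
--     loss_at = {}
--     run = total_blue
--     for v, c in pairs:
--         if c == 'red':
--             run += 1
--         elif c == 'blue':
--             run -= 1
--         loss_at[v] = run
--     best = data[0]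
--     best_loss = loss_at[data[0]]
--     for x in data[1:]:
--         l = loss_at[x]
--         if l < best_loss:
--             best_loss = l
--             best = x
--     return best
-- ===== Notes on version B (the rewrite author's own statement) =====
-- stated objective: faster
-- what changed: A recomputes the full misclassification loss from scratch for every candidate threshold (O(n^2)); B sorts the (value,color) pairs once, computes the loss of every distinct threshold value in a single prefix sweep stored in a dict, then scans the data in original order for the first strict minimum (O(n log n)).
import Mathlib
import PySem

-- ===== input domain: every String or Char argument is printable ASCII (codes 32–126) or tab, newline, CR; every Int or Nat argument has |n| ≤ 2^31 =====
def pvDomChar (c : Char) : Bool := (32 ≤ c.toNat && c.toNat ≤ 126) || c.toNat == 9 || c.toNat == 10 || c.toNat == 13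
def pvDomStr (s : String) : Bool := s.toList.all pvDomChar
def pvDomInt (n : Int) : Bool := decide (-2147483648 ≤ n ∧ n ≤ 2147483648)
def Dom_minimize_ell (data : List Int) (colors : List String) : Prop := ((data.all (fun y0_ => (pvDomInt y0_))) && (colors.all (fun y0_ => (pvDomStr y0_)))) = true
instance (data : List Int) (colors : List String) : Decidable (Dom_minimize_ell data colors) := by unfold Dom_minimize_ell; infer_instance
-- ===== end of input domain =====

-- B replaces A's per-candidate O(n^2) loss recomputation by one sort + prefix sweep
-- into a dict of per-value losses, then a first-strict-minimum scan (faster, O(n log n)).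


-- ===== PORT A =====
-- loss = 0; for n in range(len(data)): blue/red branches
def compute_ell (data : List Int) (colors : List String) (theta : Int) : Int :=
  (PySem.List.pyRange 0 (data.length : Int) 1).foldl (fun loss n =>
    if PySem.List.pyGetD colors n "" == "blue" then
      (if PySem.List.pyGetD data n 0 > theta then loss + 1 else loss)
    else if PySem.List.pyGetD colors n "" == "red" then
      (if PySem.List.pyGetD data n 0 ≤ theta then loss + 1 else loss)
    else loss) 0

-- min_ell = float('inf') is modelled as `none` (every Int is < inf); min_index starts at 0.
def minimize_ell (data : List Int) (colors : List String) : Int :=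
  let r := (PySem.List.pyRange 0 (data.length : Int) 1).foldl
    (fun (st : Option Int × Int) n =>
      let temp := compute_ell data colors (PySem.List.pyGetD data n 0)
      if (match st.1 with | none => true | some m => decide (temp < m)) then (some temp, n)
      else st) (none, 0)
  PySem.List.pyGetD data r.2 0

-- ===== PORT B =====
-- loss_at[x] below: Python raises KeyError on a missing key; under Pre_ every data value
-- is a key, so `getD _ 0` is exact there.
def minimize_ell_alt (data : List Int) (colors : List String) : Int :=
  let n : Int := (data.length : Int)
  let pairs := PySem.List.sorted (data.zip (PySem.List.slice colors none (some n))) (fun p => p.1) false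
  let totalBlue := pairs.foldl (fun acc p => if p.2 == "blue" then acc + 1 else acc) (0 : Int)
  let st := pairs.foldl (fun (st : PySem.Dict Int Int × Int) p =>
      let run := if p.2 == "red" then st.2 + 1 else if p.2 == "blue" then st.2 - 1 else st.2
      (st.1.insert p.1 run, run)) (PySem.Dict.empty, totalBlue)
  let lossAt := st.1
  let b0 := PySem.List.pyGetD data 0 0
  let r := (PySem.List.slice data (some 1) none).foldl
    (fun (st : Int × Int) x =>
      let l := lossAt.getD x 0
      if l < st.1 then (l, x) else st)
    (lossAt.getD b0 0, b0)
  r.2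

-- ===== PRECONDITION & SPEC =====
-- Pre_: A raises IndexError on empty data (data[min_index]) and when colors is shorter
-- than data (colors[n] in compute_ell); exactly those inputs are excluded.
def Pre_minimize_ell (data : List Int) (colors : List String) : Prop :=
  data ≠ [] ∧ data.length ≤ colors.length
instance (data : List Int) (colors : List String) : Decidable (Pre_minimize_ell data colors) := by unfold Pre_minimize_ell; infer_instance
def pvWitness_minimize_ell : List Int × List String := ([2, -1, 3], ["blue", "red", "blue"])

def Spec_minimize_ell (data : List Int) (colors : List String) (out : Int) : Prop := out = minimize_ell_alt data colors
instance (data : List Int) (colors : List String) (out : Int) : Decidable (Spec_minimize_ell data colors out) := by unfold Spec_minimize_ell; infer_instance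

-- ===== CLAIM (what is proved, stated in full; the proofs are below) =====
def Claim_equal_minimize_ell : Prop := ∀ (data : List Int) (colors : List String), Dom_minimize_ell data colors → Pre_minimize_ell data colors → Spec_minimize_ell data colors (minimize_ell data colors)

-- ===== LEMMAS AND PROOFS =====

def pvBlueGT (zs : List (Int × String)) (v : Int) : Nat :=
  zs.countP (fun p => decide (p.2 = "blue") && decide (v < p.1))
def pvRedLE (zs : List (Int × String)) (v : Int) : Nat :=
  zs.countP (fun p => decide (p.2 = "red") && decide (p.1 ≤ v))
def pvBlueLE (zs : List (Int × String)) (v : Int) : Nat :=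
  zs.countP (fun p => decide (p.2 = "blue") && decide (p.1 ≤ v))

theorem pv_foldl_range_zip {α β γ : Type} (f : γ → α → β → γ) (dx : α) (dy : β) :
    ∀ (xs : List α) (ys : List β), xs.length ≤ ys.length → ∀ (init : γ),
    (List.range xs.length).foldl (fun acc n => f acc (xs.getD n dx) (ys.getD n dy)) init
      = (xs.zip ys).foldl (fun acc p => f acc p.1 p.2) init := by
  intro xs
  induction xs with
  | nil => intro ys h init; simp
  | cons x xs ih =>
    intro ys h init
    cases ys with
    | nil => simp at h
    | cons y ys =>
      simp only [List.length_cons, List.range_succ_eq_map, List.foldl_cons, List.foldl_map,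
        List.zip_cons_cons, List.getD_cons_zero, List.getD_cons_succ]
      exact ih ys (by simpa using h) (f init x y)

theorem pv_lossFold (v : Int) :
    ∀ (zs : List (Int × String)) (init : Int),
    zs.foldl (fun loss p => if p.2 == "blue" then (if p.1 > v then loss + 1 else loss)
      else if p.2 == "red" then (if p.1 ≤ v then loss + 1 else loss) else loss) init
      = init + (pvBlueGT zs v : Int) + (pvRedLE zs v : Int) := by
  intro zs
  induction zs with
  | nil => intro init; simp [pvBlueGT, pvRedLE]
  | cons p zs ih =>
    intro init
    simp only [List.foldl_cons, pvBlueGT, pvRedLE, List.countP_cons]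
    rw [ih]
    simp only [pvBlueGT, pvRedLE]
    by_cases hb : p.2 = "blue" <;> by_cases hr : p.2 = "red" <;>
      by_cases h1 : p.1 ≤ v <;>
      simp [hb, hr, h1] at * <;> omega

theorem pv_countP_split {α : Type} (p q : α → Bool) (l : List α) :
    l.countP p = l.countP (fun x => p x && q x) + l.countP (fun x => p x && !q x) := by
  induction l with
  | nil => simp
  | cons x l ih =>
    simp only [List.countP_cons]
    cases hp : p x <;> cases hq : q x <;> simp [ih] <;> omega

def pvStep : (PySem.Dict Int Int × Int) → (Int × String) → (PySem.Dict Int Int × Int) :=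
  fun st p =>
    let run := if p.2 == "red" then st.2 + 1 else if p.2 == "blue" then st.2 - 1 else st.2
    (st.1.insert p.1 run, run)

theorem pv_sweep_run : ∀ (ps : List (Int × String)) (d : PySem.Dict Int Int) (r : Int),
    (ps.foldl pvStep (d, r)).2
      = r + (ps.countP (fun p => p.2 == "red") : Int) - (ps.countP (fun p => p.2 == "blue") : Int) := by
  intro ps
  induction ps with
  | nil => intro d r; simp
  | cons p ps ih =>
    intro d r
    simp only [List.foldl_cons, List.countP_cons, pvStep]
    rw [ih]
    by_cases hr : p.2 = "red" <;> by_cases hb : p.2 = "blue" <;>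
      simp [hr, hb] <;> omega

theorem pv_sweep_getD (v : Int) :
    ∀ (ps : List (Int × String)), ps.Pairwise (fun a b => a.1 ≤ b.1) →
      v ∈ ps.map Prod.fst → ∀ (d : PySem.Dict Int Int) (r : Int),
    ((ps.foldl pvStep (d, r)).1).getD v 0
      = r + (pvRedLE ps v : Int) - (pvBlueLE ps v : Int) := by
  intro ps
  induction ps using List.reverseRecOn with
  | nil => simp
  | append_singleton ps q ih =>
    intro hpw hv d r
    rw [List.foldl_append, List.foldl_cons, List.foldl_nil]
    have hsplit := List.pairwise_append.mp hpw
    have hpw' : ps.Pairwise (fun a b => a.1 ≤ b.1) := hsplit.1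
    have hle : ∀ a ∈ ps, a.1 ≤ q.1 := fun a ha => hsplit.2.2 a ha q (by simp)
    have hrun := pv_sweep_run ps d r
    by_cases hvq : v = q.1
    · have hlev : ∀ a ∈ ps, a.1 ≤ v := fun a ha => hvq ▸ hle a ha
      have hqv : q.1 ≤ v := le_of_eq hvq.symm
      simp only [pvStep]
      rw [PySem.Dict.getD_insert, if_pos hvq, hrun]
      have hred : pvRedLE (ps ++ [q]) v
          = ps.countP (fun p => p.2 == "red") + (if q.2 = "red" then 1 else 0) := by
        simp only [pvRedLE, List.countP_append]
        congr 1
        · exact List.countP_congr (fun a ha => by simp [hlev a ha])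
        · by_cases h : q.2 = "red" <;> simp [h, hqv]
      have hblue : pvBlueLE (ps ++ [q]) v
          = ps.countP (fun p => p.2 == "blue") + (if q.2 = "blue" then 1 else 0) := by
        simp only [pvBlueLE, List.countP_append]
        congr 1
        · exact List.countP_congr (fun a ha => by simp [hlev a ha])
        · by_cases h : q.2 = "blue" <;> simp [h, hqv]
      rw [hred, hblue]
      by_cases h : q.2 = "red" <;> by_cases h2 : q.2 = "blue" <;>
        simp [h, h2] <;> omega
    · have hv' : v ∈ ps.map Prod.fst := by
        simp only [List.map_append, List.mem_append, List.map_cons, List.map_nil,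
          List.mem_cons, List.not_mem_nil, or_false] at hv
        rcases hv with h | h
        · exact h
        · exact absurd h hvq
      have hnq : ¬ q.1 ≤ v := by
        rcases List.mem_map.mp hv' with ⟨a, ha, rfl⟩
        have := hle a ha
        intro hq; exact hvq (le_antisymm this hq)
      simp only [pvStep]
      rw [PySem.Dict.getD_insert, if_neg hvq, ih hpw' hv' d r]
      have hsame : ∀ c : String, (ps ++ [q]).countP (fun p => decide (p.2 = c) && decide (p.1 ≤ v))
          = ps.countP (fun p => decide (p.2 = c) && decide (p.1 ≤ v)) := by
        intro c
        simp [List.countP_append, hnq]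
      simp only [pvRedLE, pvBlueLE, hsame]

theorem pv_zip_take {α β : Type} (xs : List α) (ys : List β) :
    xs.zip (ys.take xs.length) = xs.zip ys := by
  induction xs generalizing ys with
  | nil => simp
  | cons x xs ih => cases ys <;> simp [ih]

theorem computeEll_eq (data : List Int) (colors : List String) (v : Int)
    (h : data.length ≤ colors.length) :
    compute_ell data colors v
      = (pvBlueGT (data.zip colors) v : Int) + (pvRedLE (data.zip colors) v : Int) := by
  unfold compute_ell
  rw [PySem.List.pyRange_zero_nat, List.foldl_map]
  simp only [PySem.List.pyGetD_natCast]
  rw [pv_foldl_range_zip (fun loss x y => if y == "blue" then (if x > v then loss + 1 else loss)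
      else if y == "red" then (if x ≤ v then loss + 1 else loss) else loss) 0 "" data colors h 0]
  rw [pv_lossFold]
  simp

theorem pv_sel (data : List Int) (LA LB : Int → Int) :
    ∀ (ys : List Int) (s : Int),
      (∀ p ∈ PySem.List.enumerate ys s, PySem.List.pyGetD data p.1 0 = p.2) →
      (∀ x ∈ ys, LA x = LB x) →
      ∀ (l i b : Int), PySem.List.pyGetD data i 0 = b →
      ((PySem.List.enumerate ys s).foldl
          (fun (st : Option Int × Int) p =>
            let temp := LA p.2
            if (match st.1 with | none => true | some m => decide (temp < m)) then (some temp, p.1) else st)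
          (some l, i)).1
        = some ((ys.foldl
            (fun (st : Int × Int) x => let t := LB x; if t < st.1 then (t, x) else st) (l, b)).1)
      ∧ PySem.List.pyGetD data ((PySem.List.enumerate ys s).foldl
          (fun (st : Option Int × Int) p =>
            let temp := LA p.2
            if (match st.1 with | none => true | some m => decide (temp < m)) then (some temp, p.1) else st)
          (some l, i)).2 0
        = (ys.foldl
            (fun (st : Int × Int) x => let t := LB x; if t < st.1 then (t, x) else st) (l, b)).2 := by
  intro ys
  induction ys with
  | nil =>
    intro s hy hLL l i b hi
    constructor <;> simp [PySem.List.enumerate, hi]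
  | cons y ys ih =>
    intro s hy hLL l i b hi
    have hcons : PySem.List.enumerate (y :: ys) s = (s, y) :: PySem.List.enumerate ys (s + 1) := by
      simp [PySem.List.enumerate]
    rw [hcons, List.foldl_cons, List.foldl_cons]
    have hLy : LA y = LB y := hLL y (by simp)
    have hsy : PySem.List.pyGetD data s 0 = y := by
      have := hy (s, y) (by rw [hcons]; simp)
      simpa using this
    have hy' : ∀ p ∈ PySem.List.enumerate ys (s + 1), PySem.List.pyGetD data p.1 0 = p.2 := by
      intro p hp; exact hy p (by rw [hcons]; simp [hp])
    have hLL' : ∀ x ∈ ys, LA x = LB x := fun x hx => hLL x (by simp [hx])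
    dsimp only
    rw [hLy]
    by_cases hc : LB y < l
    · rw [if_pos (by simpa using hc), if_pos hc]
      exact ih (s + 1) hy' hLL' (LB y) s y hsy
    · rw [if_neg (by simpa using hc), if_neg hc]
      exact ih (s + 1) hy' hLL' l i b hi

theorem pv_countP_blue_split (zs : List (Int × String)) (v : Int) :
    zs.countP (fun p => p.2 == "blue") = pvBlueLE zs v + pvBlueGT zs v := by
  have h1 : zs.countP (fun p => (p.2 == "blue") && decide (p.1 ≤ v)) = pvBlueLE zs v := by
    refine List.countP_congr (fun a _ => ?_)
    by_cases h : a.2 = "blue" <;> by_cases h2 : a.1 ≤ v <;> simp [h, h2]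
  have h2 : zs.countP (fun p => (p.2 == "blue") && !decide (p.1 ≤ v)) = pvBlueGT zs v := by
    refine List.countP_congr (fun a _ => ?_)
    by_cases h : a.2 = "blue" <;> by_cases h2 : a.1 ≤ v <;>
      simp [h, h2] <;> omega
  rw [pv_countP_split (fun p => p.2 == "blue") (fun p => decide (p.1 ≤ v)) zs, h1, h2]

-- ===== VERDICT (by name: the statement is the Claim_ definition above) =====
theorem minimize_ell_spec : Claim_equal_minimize_ell := by
  unfold Claim_equal_minimize_ell
  intro data colors _ hpre
  obtain ⟨hne, hlen⟩ := hpre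
  unfold Spec_minimize_ell
  -- A's loop over indices as a loop over enumerate
  have hA : minimize_ell data colors
      = PySem.List.pyGetD data ((PySem.List.enumerate data).foldl
          (fun (st : Option Int × Int) p =>
            let temp := compute_ell data colors p.2
            if (match st.1 with | none => true | some m => decide (temp < m)) then (some temp, p.1)
            else st) (none, 0)).2 0 := by
    rw [PySem.List.enumerate_eq_map_pyRange data 0, List.foldl_map]
    rfl
  cases data with
  | nil => exact absurd rfl hne
  | cons x rest =>
  -- abbreviations for B's internals
  set zs := (x :: rest).zip colors with hzs
  set ps := PySem.List.sorted zs (fun p => p.1) false with hps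
  set tb := ps.foldl (fun acc p => if p.2 == "blue" then acc + 1 else acc) (0 : Int) with htb
  set lossAt := (ps.foldl (fun (st : PySem.Dict Int Int × Int) p =>
      let run := if p.2 == "red" then st.2 + 1 else if p.2 == "blue" then st.2 - 1 else st.2
      (st.1.insert p.1 run, run)) (PySem.Dict.empty, tb)).1 with hlossAt
  have hperm : ps.Perm zs := PySem.List.sorted_perm zs (fun p => p.1) false
  have hpw : ps.Pairwise (fun a b => a.1 ≤ b.1) := PySem.List.sorted_pairwise zs (fun p => p.1)
  have htbv : tb = (zs.countP (fun p => p.2 == "blue") : Int) := by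
    rw [htb, PySem.List.foldl_if_add_one, hperm.countP_eq]
    simp
  -- B's dict lookup equals A's loss, for every data value
  have hLB : ∀ v ∈ x :: rest, lossAt.getD v 0 = compute_ell (x :: rest) colors v := by
    intro v hv
    have hmem : v ∈ ps.map Prod.fst := by
      have h1 : zs.map Prod.fst = x :: rest := List.map_fst_zip hlen
      rw [(hperm.map Prod.fst).mem_iff, h1]
      exact hv
    have hget : lossAt.getD v 0 = tb + (pvRedLE ps v : Int) - (pvBlueLE ps v : Int) := by
      rw [hlossAt]
      exact pv_sweep_getD v ps hpw hmem PySem.Dict.empty tb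
    rw [hget, computeEll_eq (x :: rest) colors v hlen, htbv]
    rw [show pvRedLE ps v = pvRedLE zs v from hperm.countP_eq _,
        show pvBlueLE ps v = pvBlueLE zs v from hperm.countP_eq _,
        pv_countP_blue_split zs v]
    push_cast
    ring
  -- B's body: slice/zip normalised
  have hB : minimize_ell_alt (x :: rest) colors
      = (rest.foldl (fun (st : Int × Int) y =>
          let l := lossAt.getD y 0
          if l < st.1 then (l, y) else st) (lossAt.getD x 0, x)).2 := by
    unfold minimize_ell_alt
    rw [hlossAt, htb, hps, hzs]
    simp only [PySem.List.slice_to colors (b := ((x :: rest).length : Int)) (by positivity),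
      Int.toNat_natCast, pv_zip_take,
      PySem.List.slice_from (x :: rest) (a := (1 : Int)) (by norm_num),
      PySem.List.pyGetD_zero_cons]
    rfl
  -- enumerate's facts for the tail
  have henum : ∀ p ∈ PySem.List.enumerate rest 1, PySem.List.pyGetD (x :: rest) p.1 0 = p.2 := by
    intro p hp
    have hp' : p ∈ PySem.List.enumerate (x :: rest) 0 := by
      have hc : PySem.List.enumerate (x :: rest) 0 = (0, x) :: PySem.List.enumerate rest 1 := by
        norm_num [PySem.List.enumerate]
      rw [hc]
      exact List.mem_cons_of_mem _ hp
    rw [PySem.List.enumerate_eq_map_pyRange (x :: rest) 0] at hp'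
    rcases List.mem_map.mp hp' with ⟨j, _, rfl⟩
    rfl
  have hx0 : PySem.List.pyGetD (x :: rest) 0 0 = x := PySem.List.pyGetD_zero_cons x rest 0
  have hsel := pv_sel (x :: rest) (fun v => compute_ell (x :: rest) colors v)
      (fun v => lossAt.getD v 0) rest 1 henum
      (fun v hv => (hLB v (List.mem_cons_of_mem _ hv)).symm)
      (lossAt.getD x 0) 0 x hx0
  -- assemble
  rw [hA, hB]
  have hc : PySem.List.enumerate (x :: rest) 0 = (0, x) :: PySem.List.enumerate rest 1 := by
    norm_num [PySem.List.enumerate]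
  rw [hc, List.foldl_cons]
  show PySem.List.pyGetD (x :: rest)
      ((PySem.List.enumerate rest 1).foldl
        (fun (st : Option Int × Int) p =>
          let temp := compute_ell (x :: rest) colors p.2
          if (match st.1 with | none => true | some m => decide (temp < m)) then (some temp, p.1)
          else st) (some (compute_ell (x :: rest) colors x), 0)).2 0 = _
  rw [← hLB x List.mem_cons_self]
  exact hsel.2
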